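-- pv_equiv track=rewrite | github.com/Ashuk205/internship_exato | flask/day2_project.py/day3_project/project3.py | categorize_problems
-- ===== SOURCE A (Python) =====
-- from collections import defaultdict
--
-- def categorize_problems(problems, categories):
--     categorized_problems = defaultdict(list)
--
--     for problem in problems:
--         categorized = False
--         for category, keywords in categories.items():
--             if any(keyword in problem.lower() for keyword in keywords):
--                 categorized_problems[category].append(problem)
--                 categorized = True
--                 break
--         if not categorized:
--             categorized_problems['Uncategorized'].append(problem)
--
--     return categorized_problems
-- ===== SOURCE B (Python) =====
-- def categorize_problems(problems, categories):
--     # Worklist sweep: lowercase each problem once and keep a pending list of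
--     # (position, lowered) pairs; each category in order claims and removes the
--     # pending problems it matches, recording position -> category; finally
--     # group the problems under their recorded labels in one pass.
--     pending = [(i, p.lower()) for i, p in enumerate(problems)]
--     label = {}
--     for category, keywords in categories.items():
--         still = []
--         for i, lp in pending:
--             if any(k in lp for k in keywords):
--                 label[i] = category
--             else:
--                 still.append((i, lp))
--         pending = still
--     out = {}
--     for i, p in enumerate(problems):
--         out.setdefault(label.get(i, 'Uncategorized'), []).append(p)
--     return out
-- ===== Notes on version B (the rewrite author's own statement) =====
-- stated objective: alternative
-- what changed: B inverts the loop nesting into a category-major worklist sweep: it lowercases each problem once into a pending list of (position, lowered) pairs, each category in order claims and removes the pending problems it matches (recording position -> category), and a final pass groups the problems under their recorded labels, instead of A's per-problem scan over categories with a break, repeated lowercasing and incremental defaultdict mutation.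
import Mathlib
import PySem

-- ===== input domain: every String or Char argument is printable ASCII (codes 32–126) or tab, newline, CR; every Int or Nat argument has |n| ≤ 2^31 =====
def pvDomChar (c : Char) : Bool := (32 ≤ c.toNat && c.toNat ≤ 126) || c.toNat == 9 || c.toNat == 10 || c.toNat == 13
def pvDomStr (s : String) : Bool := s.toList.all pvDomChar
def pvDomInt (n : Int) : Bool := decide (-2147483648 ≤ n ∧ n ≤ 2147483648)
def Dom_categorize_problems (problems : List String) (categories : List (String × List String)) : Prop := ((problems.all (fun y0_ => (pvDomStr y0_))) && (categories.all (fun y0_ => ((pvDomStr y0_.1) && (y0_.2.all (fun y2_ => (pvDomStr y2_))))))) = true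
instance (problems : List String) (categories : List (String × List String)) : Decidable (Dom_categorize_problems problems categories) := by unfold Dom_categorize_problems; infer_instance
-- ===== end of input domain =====

-- B replaces A's per-problem scan over categories (with repeated lowercasing and a
-- break) by a category-major worklist sweep: each category claims and removes the
-- still-pending problems it matches; return value proved equal on all inputs.

-- ===== PORT A =====
-- inner 'for category, keywords in categories.items(): … break' loop with the
-- 'categorized' flag: returns the dict after a possible append, plus the flag
def pvInnerA (problem : String) (cats : List (String × List String))
    (d : PySem.Dict String (List String)) : PySem.Dict String (List String) × Bool :=
  match cats with
  | [] => (d, false)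
  | (category, keywords) :: rest =>
      if keywords.any (fun keyword => PySem.Str.isIn keyword (PySem.Str.lower problem)) then
        (d.modify category [] (· ++ [problem]), true)
      else
        pvInnerA problem rest d

def categorize_problems (problems : List String) (categories : List (String × List String)) :
    List (String × List String) :=
  (problems.foldl
    (fun d problem =>
      let r := pvInnerA problem categories d
      if r.2 then r.1 else r.1.modify "Uncategorized" [] (· ++ [problem]))
    PySem.Dict.empty).items

-- ===== PORT B =====
-- 'any(k in lp for k in keywords)'
def pvMatch (keywords : List String) (lp : String) : Bool :=
  keywords.any (fun k => PySem.Str.isIn k lp)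

-- one category's pass over the pending worklist: state = (still, label)
def pvSweepCat (keywords : List String) (category : String)
    (pending : List (Int × String)) (lab : PySem.Dict Int String) :
    List (Int × String) × PySem.Dict Int String :=
  pending.foldl
    (fun st ilp =>
      if pvMatch keywords ilp.2 then (st.1, st.2.insert ilp.1 category)
      else (st.1 ++ [ilp], st.2))
    ([], lab)

-- 'for category, keywords in categories.items(): …; pending = still'
def pvSweep (cats : List (String × List String)) (pending : List (Int × String))
    (lab : PySem.Dict Int String) : PySem.Dict Int String :=
  match cats with
  | [] => lab
  | (category, keywords) :: rest =>
      let st := pvSweepCat keywords category pending lab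
      pvSweep rest st.1 st.2

def categorize_problems_alt (problems : List String) (categories : List (String × List String)) :
    List (String × List String) :=
  let pending := (PySem.List.enumerate problems).map (fun ip => (ip.1, PySem.Str.lower ip.2))
  let lab := pvSweep categories pending PySem.Dict.empty
  ((PySem.List.enumerate problems).foldl
    (fun d ip => d.modify (lab.getD ip.1 "Uncategorized") [] (· ++ [ip.2]))
    PySem.Dict.empty).items

-- ===== PRECONDITION & SPEC =====
def Spec_categorize_problems (problems : List String) (categories : List (String × List String)) (out : List (String × List String)) : Prop := out = categorize_problems_alt problems categories
instance (problems : List String) (categories : List (String × List String)) (out : List (String × List String)) : Decidable (Spec_categorize_problems problems categories out) := by unfold Spec_categorize_problems; infer_instance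

-- ===== CLAIM (what is proved, stated in full; the proofs are below) =====
def Claim_equal_categorize_problems : Prop := ∀ (problems : List String) (categories : List (String × List String)), Dom_categorize_problems problems categories → Spec_categorize_problems problems categories (categorize_problems problems categories)

-- ===== LEMMAS AND PROOFS =====

-- the label A assigns a problem: first category with a matching keyword (on lp = problem.lower())
def pvLabelLp (cats : List (String × List String)) (lp : String) : String :=
  match cats.find? (fun ck => pvMatch ck.2 lp) with
  | some ck => ck.1
  | none => "Uncategorized"

lemma pvInnerA_step (problem : String) (cats : List (String × List String))
    (d : PySem.Dict String (List String)) :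
    (let r := pvInnerA problem cats d
     if r.2 then r.1 else r.1.modify "Uncategorized" [] (· ++ [problem]))
    = d.modify (pvLabelLp cats (PySem.Str.lower problem)) [] (· ++ [problem]) := by
  induction cats with
  | nil => rfl
  | cons ck rest ih =>
      obtain ⟨category, keywords⟩ := ck
      by_cases h : keywords.any (fun keyword => PySem.Str.isIn keyword (PySem.Str.lower problem)) = true
      · simp only [pvInnerA, if_pos h, pvLabelLp]
        rw [List.find?_cons_of_pos (by exact h)]
        simp
      · simp only [pvInnerA, if_neg h]
        rw [ih]
        simp only [pvLabelLp]
        rw [List.find?_cons_of_neg (by simpa [pvMatch] using h)]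

-- A's whole loop is a modify-append fold keyed by each problem's label
lemma pvA_eq_fold (problems : List String) (categories : List (String × List String)) :
    categorize_problems problems categories
    = (problems.foldl
        (fun d p => d.modify (pvLabelLp categories (PySem.Str.lower p)) [] (· ++ [p]))
        PySem.Dict.empty).items := by
  unfold categorize_problems
  congr 1
  apply PySem.List.foldl_congr_mem
  intro d p _
  exact pvInnerA_step p categories d

-- the pair fold of one category splits: survivors = filter, labels = inserts of the matched
lemma pvSweepCat_split (keywords : List String) (category : String) :
    ∀ (pending acc : List (Int × String)) (lab : PySem.Dict Int String),
    pending.foldl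
      (fun st ilp =>
        if pvMatch keywords ilp.2 then (st.1, st.2.insert ilp.1 category)
        else (st.1 ++ [ilp], st.2))
      (acc, lab)
    = (acc ++ pending.filter (fun ilp => !(pvMatch keywords ilp.2)),
       (pending.filter (fun ilp => pvMatch keywords ilp.2)).foldl
         (fun d ilp => d.insert ilp.1 category) lab) := by
  intro pending
  induction pending with
  | nil => intro acc lab; simp
  | cons x l ih =>
      intro acc lab
      rw [List.foldl_cons]
      by_cases h : pvMatch keywords x.2 = true
      · rw [if_pos h, ih, List.filter_cons_of_neg (by simp [h]),
          List.filter_cons_of_pos (by exact h), List.foldl_cons]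
      · rw [if_neg h, ih, List.filter_cons_of_pos (by simpa using h),
          List.filter_cons_of_neg (by simpa using h), List.append_assoc, List.singleton_append]

-- inserting a constant value for a list of keys
lemma pvGet_foldl_insert_const (category : String) :
    ∀ (l : List (Int × String)) (lab : PySem.Dict Int String) (i : Int),
    (l.foldl (fun d ilp => d.insert ilp.1 category) lab).get? i
    = if l.any (fun ilp => ilp.1 == i) then some category else lab.get? i := by
  intro l
  induction l with
  | nil => intro lab i; simp
  | cons x l ih =>
      intro lab i
      rw [List.foldl_cons, ih, List.any_cons]
      by_cases hx : x.1 = i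
      · subst hx
        have hc : (x.1 == x.1 || l.any fun ilp => ilp.1 == x.1) = true := by simp
        rw [hc, if_pos rfl]
        by_cases hl : (l.any fun ilp => ilp.1 == x.1) = true
        · rw [if_pos hl]
        · rw [if_neg hl]
          exact PySem.Dict.get?_insert_self _ _ _
      · rw [show (x.1 == i) = false from by simpa using hx, Bool.false_or,
          PySem.Dict.get?_insert_of_ne lab category (fun h => hx h.symm)]

-- an index carried by no pending cell keeps its label through the sweep
lemma pvSweep_absent (cats : List (String × List String)) :
    ∀ (pending : List (Int × String)) (lab : PySem.Dict Int String) (i : Int),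
    (∀ q ∈ pending, q.1 ≠ i) →
    (pvSweep cats pending lab).get? i = lab.get? i := by
  induction cats with
  | nil => intro pending lab i _; rfl
  | cons ck rest ih =>
      intro pending lab i habs
      obtain ⟨category, keywords⟩ := ck
      simp only [pvSweep, pvSweepCat, pvSweepCat_split, List.nil_append]
      rw [ih _ _ _ (fun q hq => habs q (List.mem_of_mem_filter hq))]
      rw [pvGet_foldl_insert_const]
      have hnone : (List.filter (fun ilp => pvMatch keywords ilp.2) pending).any
          (fun ilp => ilp.1 == i) = false := by
        simp only [List.any_eq_false]
        intro q hq
        simpa using habs q (List.mem_of_mem_filter hq)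
      rw [hnone]
      simp

-- main invariant: a pending cell ends up labelled with its first matching category
lemma pvSweep_pending (cats : List (String × List String)) :
    ∀ (pending : List (Int × String)) (lab : PySem.Dict Int String),
    pending.Pairwise (fun a b => a.1 ≠ b.1) →
    (∀ q ∈ pending, lab.get? q.1 = none) →
    ∀ q ∈ pending, (pvSweep cats pending lab).getD q.1 "Uncategorized" = pvLabelLp cats q.2 := by
  induction cats with
  | nil =>
      intro pending lab _ hnone q hq
      rw [pvSweep, PySem.Dict.getD_eq_get?_getD, hnone q hq]
      rfl
  | cons ck rest ih =>
      intro pending lab hnd hnone q hq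
      obtain ⟨category, keywords⟩ := ck
      have hsymm : Symmetric (fun (a b : Int × String) => a.1 ≠ b.1) := by intro a b h; exact Ne.symm h
      have hfst : ∀ a ∈ pending, ∀ b ∈ pending, a ≠ b → a.1 ≠ b.1 :=
        fun a ha b hb hne => List.Pairwise.forall hsymm hnd ha hb hne
      simp only [pvSweep, pvSweepCat, pvSweepCat_split, List.nil_append]
      by_cases hm : pvMatch keywords q.2 = true
      · -- q is claimed by this category and removed from pending
        have habs : ∀ r ∈ pending.filter (fun ilp => !(pvMatch keywords ilp.2)), r.1 ≠ q.1 := by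
          intro r hr
          have hrp := List.mem_of_mem_filter hr
          have hrne : r ≠ q := by
            intro h
            subst h
            have := (List.mem_filter.mp hr).2
            simp [hm] at this
          exact hfst r hrp q hq hrne
        rw [PySem.Dict.getD_eq_get?_getD, pvSweep_absent rest _ _ _ habs,
          pvGet_foldl_insert_const]
        have hany : (List.filter (fun ilp => pvMatch keywords ilp.2) pending).any
            (fun ilp => ilp.1 == q.1) = true :=
          List.any_of_mem (List.mem_filter.mpr ⟨hq, hm⟩) (by simp)
        rw [hany, if_pos rfl, Option.getD_some]
        simp only [pvLabelLp]
        rw [List.find?_cons_of_pos (by exact hm)]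
      · -- q survives this category's pass
        have hq' : q ∈ pending.filter (fun ilp => !(pvMatch keywords ilp.2)) :=
          List.mem_filter.mpr ⟨hq, by simp [hm]⟩
        have hres := ih (pending.filter (fun ilp => !(pvMatch keywords ilp.2)))
          ((pending.filter (fun ilp => pvMatch keywords ilp.2)).foldl
            (fun d ilp => d.insert ilp.1 category) lab)
          (List.Pairwise.filter _ hnd)
          (by
            intro r hr
            rw [pvGet_foldl_insert_const]
            have hno : (List.filter (fun ilp => pvMatch keywords ilp.2) pending).any
                (fun ilp => ilp.1 == r.1) = false := by
              simp only [List.any_eq_false]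
              intro m hmm
              have hmp := List.mem_of_mem_filter hmm
              have hmne : m ≠ r := by
                intro h
                subst h
                have h1 := (List.mem_filter.mp hmm).2
                have h2 := (List.mem_filter.mp hr).2
                simp [h1] at h2
              simpa using hfst m hmp r (List.mem_of_mem_filter hr) hmne
            rw [hno, if_neg (show ¬(false = true) by simp)]
            exact hnone r (List.mem_of_mem_filter hr))
          q hq'
        rw [hres]
        simp only [pvLabelLp]
        rw [List.find?_cons_of_neg (by simpa using hm)]

lemma pvB_eq_fold (problems : List String) (categories : List (String × List String)) :
    categorize_problems_alt problems categories
    = (problems.foldl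
        (fun d p => d.modify (pvLabelLp categories (PySem.Str.lower p)) [] (· ++ [p]))
        PySem.Dict.empty).items := by
  have hpair : ((PySem.List.enumerate problems).map
      (fun ip => (ip.1, PySem.Str.lower ip.2))).Pairwise (fun a b => a.1 ≠ b.1) := by
    refine List.Pairwise.map _ ?_ (PySem.List.pairwise_lt_enumerate problems 0)
    intro a b h
    exact ne_of_lt h
  have hlab : ∀ ip ∈ PySem.List.enumerate problems,
      (pvSweep categories
        ((PySem.List.enumerate problems).map (fun ip => (ip.1, PySem.Str.lower ip.2)))
        PySem.Dict.empty).getD ip.1 "Uncategorized"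
      = pvLabelLp categories (PySem.Str.lower ip.2) := by
    intro ip hip
    exact pvSweep_pending categories _ _ hpair (by intro q _; simp)
      (ip.1, PySem.Str.lower ip.2) (List.mem_map_of_mem hip)
  show ((PySem.List.enumerate problems).foldl
      (fun d ip => d.modify
        ((pvSweep categories
          ((PySem.List.enumerate problems).map (fun ip => (ip.1, PySem.Str.lower ip.2)))
          PySem.Dict.empty).getD ip.1 "Uncategorized") [] (· ++ [ip.2]))
      PySem.Dict.empty).items = _
  congr 1
  conv_rhs => rw [show problems = (PySem.List.enumerate problems).map (fun ip => ip.2) from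
    (PySem.List.map_snd_enumerate problems 0).symm, List.foldl_map]
  apply PySem.List.foldl_congr_mem
  intro d ip hip
  rw [hlab ip hip]

-- ===== VERDICT (by name: the statement is the Claim_ definition above) =====
theorem categorize_problems_spec : Claim_equal_categorize_problems := by
  intro problems categories _hdom
  unfold Spec_categorize_problems
  rw [pvA_eq_fold, pvB_eq_fold]
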